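-- pv_equiv track=rewrite | github.com/omercesursen/Denemeler | is_dict_values_unique.py | is_dict_values_unique
-- ===== SOURCE A (Python) =====
-- def is_dict_values_unique(d: dict) -> bool:
--     gorulen_degerler = []
--
--     for anahtar in d:
--         deger = d[anahtar]
--
--         if deger in gorulen_degerler:
--             return False
--
--         gorulen_degerler.append(deger)
--
--     return True
-- ===== SOURCE B (Python) =====
-- def is_dict_values_unique(d: dict) -> bool:
--     return len(set(d.values())) == len(d)
-- ===== Notes on version B (the rewrite author's own statement) =====
-- stated objective: simpler
-- what changed: Replaces A's incremental membership scan with a single cardinality comparison: build the set of all values once and compare its size to the number of keys.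
import Mathlib
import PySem

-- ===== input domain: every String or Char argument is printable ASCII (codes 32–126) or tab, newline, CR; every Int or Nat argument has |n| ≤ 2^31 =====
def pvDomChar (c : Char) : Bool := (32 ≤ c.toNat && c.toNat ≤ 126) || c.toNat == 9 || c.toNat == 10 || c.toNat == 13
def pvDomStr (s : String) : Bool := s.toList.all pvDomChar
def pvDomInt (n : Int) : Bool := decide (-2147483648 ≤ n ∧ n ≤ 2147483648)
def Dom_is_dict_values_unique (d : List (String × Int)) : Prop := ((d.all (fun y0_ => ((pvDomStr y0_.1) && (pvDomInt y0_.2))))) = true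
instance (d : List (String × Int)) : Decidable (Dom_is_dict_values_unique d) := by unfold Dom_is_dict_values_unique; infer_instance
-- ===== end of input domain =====

-- B is simpler: one cardinality comparison (set of values vs number of keys) instead of A's incremental membership scan.

-- ===== PORT A =====
-- the loop: seen-values accumulator, early False on a repeat
def uniqLoop (seen : List Int) : List (String × Int) → Bool
  | [] => true
  | (_, v) :: rest => if seen.contains v then false else uniqLoop (seen ++ [v]) rest

def is_dict_values_unique (d : List (String × Int)) : Bool := uniqLoop [] d

-- ===== PORT B =====
def is_dict_values_unique_alt (d : List (String × Int)) : Bool :=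
  decide ((PySem.Set.ofList (d.map Prod.snd)).length = d.length)

-- ===== PRECONDITION & SPEC =====
def Spec_is_dict_values_unique (d : List (String × Int)) (out : Bool) : Prop := out = is_dict_values_unique_alt d
instance (d : List (String × Int)) (out : Bool) : Decidable (Spec_is_dict_values_unique d out) := by unfold Spec_is_dict_values_unique; infer_instance

-- ===== CLAIM (what is proved, stated in full; the proofs are below) =====
def Claim_equal_is_dict_values_unique : Prop := ∀ (d : List (String × Int)), Dom_is_dict_values_unique d → Spec_is_dict_values_unique d (is_dict_values_unique d)

-- ===== LEMMAS AND PROOFS =====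

lemma length_update_le (s : List Int) (xs : List Int) :
    (PySem.Set.update s xs).length ≤ s.length + xs.length := by
  rw [PySem.Set.update_eq_append_filter]
  rw [List.length_append]
  have h1 := List.length_filter_le (fun y => !(PySem.Set.contains s y)) (PySem.Set.ofList xs)
  have h2 := PySem.Set.length_ofList_le (xs := xs)
  omega

lemma uniqLoop_eq (d : List (String × Int)) : ∀ (s : List Int),
    uniqLoop s d = decide ((PySem.Set.update s (d.map Prod.snd)).length = s.length + d.length) := by
  induction d with
  | nil =>
    intro s
    simp [uniqLoop, PySem.Set.update]
  | cons p rest ih =>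
    intro s
    obtain ⟨k, v⟩ := p
    by_cases hv : v ∈ s
    · have hc : s.contains v = true := by simpa using hv
      rw [show ((k, v) :: rest).map Prod.snd = v :: rest.map Prod.snd from rfl,
        PySem.Set.update_cons, PySem.Set.add_of_mem hv]
      have hle : (PySem.Set.update s (rest.map Prod.snd)).length ≤ s.length + rest.length := by
        have := length_update_le s (rest.map Prod.snd)
        simpa using this
      simp only [uniqLoop, hc, if_true, List.length_cons]
      symm
      simp only [decide_eq_false_iff_not]
      omega
    · have hc : s.contains v = false := by simpa using hv
      rw [show ((k, v) :: rest).map Prod.snd = v :: rest.map Prod.snd from rfl,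
        PySem.Set.update_cons, PySem.Set.add_of_not_mem hv]
      simp only [uniqLoop, hc, if_false, Bool.false_eq_true]
      rw [ih (s ++ [v])]
      congr 1
      rw [List.length_append]
      simp
      omega

-- ===== VERDICT (by name: the statement is the Claim_ definition above) =====
theorem is_dict_values_unique_spec : Claim_equal_is_dict_values_unique := by
  intro d _
  unfold Spec_is_dict_values_unique is_dict_values_unique is_dict_values_unique_alt
  rw [uniqLoop_eq d []]
  rw [PySem.Set.update_nil_left]
  simp
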